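-- pv_equiv track=rewrite | github.com/Volkov-da/curie_calculator | src/file_builder.py | up_down_spin_counter
-- ===== SOURCE A (Python) =====
-- def up_down_spin_counter(in_data: list) -> list:
--     spin_down = 0
--     spin_up = 0
--     no_spin = 0
--     for row in in_data[8:]:
--         if 'spin=-' in row:
--             spin_down += 1
--         elif 'spin=' in row:
--             spin_up += 1
--         else:
--             no_spin += 1
--     return [spin_up, spin_down, no_spin]
-- ===== SOURCE B (Python) =====
-- def up_down_spin_counter(in_data: list) -> list:
--     rows = in_data[8:]
--     total = len(rows)
--     down = sum('spin=-' in row for row in rows)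
--     with_spin = sum('spin=' in row for row in rows)
--     return [with_spin - down, down, total - with_spin]
-- ===== Notes on version B (the rewrite author's own statement) =====
-- stated objective: alternative
-- what changed: Replaces the single three-way branching loop by complementary counting: count rows containing 'spin=-' and rows containing 'spin=', then derive up and none by subtraction (correct because 'spin=-' in a row implies 'spin=' in it).
import Mathlib
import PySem

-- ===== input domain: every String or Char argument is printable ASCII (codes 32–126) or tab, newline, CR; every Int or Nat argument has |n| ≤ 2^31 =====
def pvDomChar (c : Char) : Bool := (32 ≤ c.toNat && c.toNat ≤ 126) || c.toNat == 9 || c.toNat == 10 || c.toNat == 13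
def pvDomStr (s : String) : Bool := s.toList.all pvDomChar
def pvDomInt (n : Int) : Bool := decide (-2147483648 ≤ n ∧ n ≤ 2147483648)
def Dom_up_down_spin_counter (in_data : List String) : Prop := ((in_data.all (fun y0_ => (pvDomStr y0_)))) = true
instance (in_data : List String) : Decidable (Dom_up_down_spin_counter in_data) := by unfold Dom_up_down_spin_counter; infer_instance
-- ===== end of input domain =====

-- B replaces A's three-way branching loop by complementary counting (count 'spin=-' and 'spin=' rows, derive the rest by subtraction); objective: alternative decomposition, same cost.


-- ===== PORT A =====
-- Literal port of A: one pass over in_data[8:] with three counters, branches in order.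
def up_down_spin_counter (in_data : List String) : List Int :=
  let r := (PySem.List.slice in_data (some 8) none).foldl
    (fun (s : Int × Int × Int) row =>
      if PySem.Str.isIn "spin=-" row then (s.1 + 1, s.2.1, s.2.2)
      else if PySem.Str.isIn "spin=" row then (s.1, s.2.1 + 1, s.2.2)
      else (s.1, s.2.1, s.2.2 + 1))
    ((0 : Int), (0 : Int), (0 : Int))
  [r.2.1, r.1, r.2.2]

-- ===== PORT B =====
-- Port of B: count 'spin=-' rows and 'spin=' rows, derive up and none by subtraction.
def up_down_spin_counter_alt (in_data : List String) : List Int :=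
  let rows := PySem.List.slice in_data (some 8) none
  let total : Int := rows.length
  let down : Int := rows.foldl (fun acc row => acc + (if PySem.Str.isIn "spin=-" row then 1 else 0)) 0
  let with_spin : Int := rows.foldl (fun acc row => acc + (if PySem.Str.isIn "spin=" row then 1 else 0)) 0
  [with_spin - down, down, total - with_spin]

-- ===== PRECONDITION & SPEC =====
def Spec_up_down_spin_counter (in_data : List String) (out : List Int) : Prop := out = up_down_spin_counter_alt in_data
instance (in_data : List String) (out : List Int) : Decidable (Spec_up_down_spin_counter in_data out) := by unfold Spec_up_down_spin_counter; infer_instance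

-- ===== CLAIM (what is proved, stated in full; the proofs are below) =====
def Claim_equal_up_down_spin_counter : Prop := ∀ (in_data : List String), Dom_up_down_spin_counter in_data → Spec_up_down_spin_counter in_data (up_down_spin_counter in_data)

-- ===== LEMMAS AND PROOFS =====
-- ===== VERDICT (by name: the statement is the Claim_ definition above) =====
-- a row containing "spin=-" contains "spin="
lemma spin_imp (row : String) (h : PySem.Str.isIn "spin=-" row = true) :
    PySem.Str.isIn "spin=" row = true := by
  rw [PySem.Str.isIn_iff_infix] at h ⊢
  exact List.IsInfix.trans (by decide) h

lemma sum_shift (f : String → Int) (rows : List String) (a : Int) :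
    rows.foldl (fun acc row => acc + f row) a = a + rows.foldl (fun acc row => acc + f row) 0 := by
  induction rows generalizing a with
  | nil => simp
  | cons r rs ih => simp only [List.foldl_cons]; rw [ih, ih (0 + f r)]; ring

lemma main_lemma (rows : List String) (d u n : Int) :
    rows.foldl
      (fun (s : Int × Int × Int) row =>
        if PySem.Str.isIn "spin=-" row then (s.1 + 1, s.2.1, s.2.2)
        else if PySem.Str.isIn "spin=" row then (s.1, s.2.1 + 1, s.2.2)
        else (s.1, s.2.1, s.2.2 + 1)) (d, u, n)
    = (d + rows.foldl (fun acc row => acc + (if PySem.Str.isIn "spin=-" row then 1 else 0)) 0,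
       u + (rows.foldl (fun acc row => acc + (if PySem.Str.isIn "spin=" row then 1 else 0)) 0
            - rows.foldl (fun acc row => acc + (if PySem.Str.isIn "spin=-" row then 1 else 0)) 0),
       n + ((rows.length : Int)
            - rows.foldl (fun acc row => acc + (if PySem.Str.isIn "spin=" row then 1 else 0)) 0)) := by
  induction rows generalizing d u n with
  | nil => simp
  | cons r rs ih =>
    simp only [List.foldl_cons, List.length_cons]
    rw [sum_shift (fun row => if PySem.Str.isIn "spin=-" row then 1 else 0) rs,
        sum_shift (fun row => if PySem.Str.isIn "spin=" row then 1 else 0) rs]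
    by_cases h1 : PySem.Str.isIn "spin=-" r = true
    · rw [if_pos h1, if_pos (spin_imp r h1), ih]
      simp only [Prod.mk.injEq, h1, if_true]
      refine ⟨?_, ?_, ?_⟩ <;> push_cast <;> ring
    · rw [if_neg h1]
      by_cases h2 : PySem.Str.isIn "spin=" r = true
      · rw [if_pos h2, ih]
        simp only [Prod.mk.injEq, h1, h2, if_true]
        refine ⟨?_, ?_, ?_⟩ <;> push_cast <;> ring
      · rw [if_neg h2, ih]
        simp only [Prod.mk.injEq, h1, h2]
        refine ⟨?_, ?_, ?_⟩ <;> push_cast <;> ring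

theorem up_down_spin_counter_spec : Claim_equal_up_down_spin_counter := by
  intro in_data _
  unfold Spec_up_down_spin_counter up_down_spin_counter up_down_spin_counter_alt
  simp only [main_lemma]
  simp
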